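-- pv_equiv track=rewrite | github.com/GeorgeKovshov/codewars2 | codewars10.py | count_attacking_rooks
-- ===== SOURCE A (Python) =====
-- def count_attacking_rooks(rooks):
--     dict_let = {}
--     dict_dig = {}
--     for r in rooks:
--         if r[0] not in dict_let:
--             dict_let[r[0]] = 0
--         dict_let[r[0]] += 1
--         if r[1] not in dict_dig:
--             dict_dig[r[1]] = 0
--         dict_dig[r[1]] += 1
--     result = 0
--     for x in dict_let:
--         result += dict_let[x] - 1
--     for y in dict_dig:
--         result += dict_dig[y] - 1
--     return result
-- ===== SOURCE B (Python) =====
-- def count_attacking_rooks(rooks):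
--     rows = {r[0] for r in rooks}
--     cols = {r[1] for r in rooks}
--     return 2 * len(rooks) - len(rows) - len(cols)
-- ===== Notes on version B (the rewrite author's own statement) =====
-- stated objective: simpler
-- what changed: Replaces the two per-key counting dicts and the two summation loops by two set comprehensions and the closed form 2*len(rooks) - len(rows) - len(cols), since summing (count-1) over groups equals len(rooks) minus the number of distinct keys.
import Mathlib
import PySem

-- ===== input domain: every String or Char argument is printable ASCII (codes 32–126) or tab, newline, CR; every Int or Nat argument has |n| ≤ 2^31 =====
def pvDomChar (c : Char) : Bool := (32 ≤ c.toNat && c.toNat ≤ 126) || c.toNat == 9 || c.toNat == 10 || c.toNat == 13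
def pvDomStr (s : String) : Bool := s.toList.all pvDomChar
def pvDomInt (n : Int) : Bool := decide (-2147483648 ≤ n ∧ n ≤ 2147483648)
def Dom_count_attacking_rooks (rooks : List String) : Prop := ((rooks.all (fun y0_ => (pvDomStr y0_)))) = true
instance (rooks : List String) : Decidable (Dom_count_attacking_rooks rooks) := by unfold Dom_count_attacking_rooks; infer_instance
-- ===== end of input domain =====

-- B replaces A's two counting dicts and summation loops by two sets of distinct keys and
-- the closed form 2*len(rooks) - len(rows) - len(cols) (objective: simpler).

-- ===== PORT A =====
-- one iteration of A's loop over rooks; on a string shorter than 2 Python raises IndexError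
-- (pyGet? = none), which Pre_ excludes — the port leaves the state unchanged there.
def aStep (s : PySem.Dict Char Int × PySem.Dict Char Int) (r : String) :
    PySem.Dict Char Int × PySem.Dict Char Int :=
  match PySem.Str.pyGet? r 0, PySem.Str.pyGet? r 1 with
  | some c0, some c1 =>
      let dl := s.1
      let dl := if dl.contains c0 then dl else dl.insert c0 0
      let dl := dl.insert c0 (dl.getD c0 0 + 1)
      let dd := s.2
      let dd := if dd.contains c1 then dd else dd.insert c1 0
      let dd := dd.insert c1 (dd.getD c1 0 + 1)
      (dl, dd)
  | _, _ => s

def count_attacking_rooks (rooks : List String) : Int :=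
  let s := rooks.foldl aStep (PySem.Dict.empty, PySem.Dict.empty)
  let result : Int := 0
  let result := s.1.keys.foldl (fun acc x => acc + (s.1.getD x 0 - 1)) result
  let result := s.2.keys.foldl (fun acc y => acc + (s.2.getD y 0 - 1)) result
  result

-- ===== PORT B =====
-- rows = {r[0] for r in rooks}; cols = {r[1] for r in rooks}; the filterMap guard only
-- totalizes r[0]/r[1] (none = IndexError, excluded by Pre_).
def count_attacking_rooks_alt (rooks : List String) : Int :=
  let rows : PySem.Set Char := PySem.Set.ofList (rooks.filterMap (fun r => PySem.Str.pyGet? r 0))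
  let cols : PySem.Set Char := PySem.Set.ofList (rooks.filterMap (fun r => PySem.Str.pyGet? r 1))
  2 * (rooks.length : Int) - (rows.length : Int) - (cols.length : Int)

-- ===== PRECONDITION & SPEC =====
-- Pre_ excludes exactly the inputs on which A raises IndexError: a rook string of length < 2.
def Pre_count_attacking_rooks (rooks : List String) : Prop :=
  ∀ r ∈ rooks, 2 ≤ PySem.Str.len r
instance (rooks : List String) : Decidable (Pre_count_attacking_rooks rooks) := by
  unfold Pre_count_attacking_rooks; infer_instance
def pvWitness_count_attacking_rooks : List String := ["a1", "a2", "b1"]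

def Spec_count_attacking_rooks (rooks : List String) (out : Int) : Prop := out = count_attacking_rooks_alt rooks
instance (rooks : List String) (out : Int) : Decidable (Spec_count_attacking_rooks rooks out) := by unfold Spec_count_attacking_rooks; infer_instance

-- ===== CLAIM (what is proved, stated in full; the proofs are below) =====
def Claim_equal_count_attacking_rooks : Prop := ∀ (rooks : List String), Dom_count_attacking_rooks rooks → Pre_count_attacking_rooks rooks → Spec_count_attacking_rooks rooks (count_attacking_rooks rooks)

-- ===== LEMMAS AND PROOFS =====

-- under Pre_, r[0] and r[1] exist
lemma pyGet_exists (r : String) (i : Int) (hi : i = 0 ∨ i = 1) (hr : 2 ≤ PySem.Str.len r) :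
    ∃ c, PySem.Str.pyGet? r i = some c := by
  have hL := @String.length_toList r
  have hlen : 2 ≤ r.toList.length := by
    simp only [PySem.Str.len] at hr
    omega
  have h0 : (0:Int) ≤ i := by rcases hi with rfl|rfl <;> norm_num
  have hg := PySem.List.pyGet?_of_nonneg (xs := r.toList) h0
  simp only [PySem.Str.pyGet?, PySem.Chars.pyGet?, hg]
  have hlt : i.toNat < r.toList.length := by rcases hi with rfl|rfl <;> omega
  simp [List.getElem?_eq_some_iff]
  omega

-- A's guarded "if absent insert 0, then increment" step is the plain counter step.
lemma dict_step_norm (d : PySem.Dict Char Int) (c : Char) :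
    (if d.contains c then d else d.insert c 0).insert c
      ((if d.contains c then d else d.insert c 0).getD c 0 + 1) =
    d.insert c (d.getD c 0 + 1) := by
  by_cases h : d.contains c = true
  · simp [h]
  · rw [if_neg h, PySem.Dict.getD_insert_self, PySem.Dict.insert_insert_self]
    have : d.get? c = none := by
      rw [PySem.Dict.get?_eq_none_iff_contains]
      simpa using h
    simp [PySem.Dict.getD, this]

-- A's loop over rooks builds the two counters of the first and second characters.
lemma aFold_eq_counters (rooks : List String) (h : Pre_count_attacking_rooks rooks)
    (d e : PySem.Dict Char Int) :
    rooks.foldl aStep (d, e) =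
      ((rooks.filterMap (fun r => PySem.Str.pyGet? r 0)).foldl
          (fun d x => d.insert x (d.getD x 0 + 1)) d,
       (rooks.filterMap (fun r => PySem.Str.pyGet? r 1)).foldl
          (fun d x => d.insert x (d.getD x 0 + 1)) e) := by
  induction rooks generalizing d e with
  | nil => simp
  | cons r t ih =>
    have hr : 2 ≤ PySem.Str.len r := h r (by simp)
    obtain ⟨c0, hc0⟩ := pyGet_exists r 0 (Or.inl rfl) hr
    obtain ⟨c1, hc1⟩ := pyGet_exists r 1 (Or.inr rfl) hr
    have ht : Pre_count_attacking_rooks t := fun x hx => h x (List.mem_cons_of_mem _ hx)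
    have hstep : aStep (d, e) r =
        (d.insert c0 (d.getD c0 0 + 1), e.insert c1 (e.getD c1 0 + 1)) := by
      simp only [aStep, hc0, hc1]
      exact Prod.ext (dict_step_norm d c0) (dict_step_norm e c1)
    have hc0' : PySem.List.pyGet? r.toList 0 = some c0 := by
      simpa [PySem.Str.pyGet?, PySem.Chars.pyGet?] using hc0
    have hc1' : PySem.List.pyGet? r.toList 1 = some c1 := by
      simpa [PySem.Str.pyGet?, PySem.Chars.pyGet?] using hc1
    rw [List.foldl_cons, hstep, ih ht]
    simp [hc0', hc1']

-- cast a sum of Nat-valued terms to Int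
lemma sum_map_intCast (l : List Char) (f : Char → Nat) :
    (l.map (fun k => (f k : Int))).sum = ((l.map f).sum : Nat) := by
  induction l with
  | nil => simp
  | cons x t ih => simp [ih]

-- the distinct elements, as PySem builds them, are a permutation of Mathlib's dedup
lemma ofList_perm_dedup (xs : List Char) : (PySem.Set.ofList xs).Perm xs.dedup := by
  rw [List.perm_ext_iff_of_nodup (PySem.Set.nodup_ofList xs) xs.nodup_dedup]
  intro a
  rw [PySem.Set.mem_ofList, List.mem_dedup]

-- summing each distinct element's multiplicity recovers the length
lemma sum_counts (xs : List Char) :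
    ((PySem.Set.ofList xs).map (fun k => (xs.count k : Int))).sum = (xs.length : Int) := by
  rw [sum_map_intCast]
  have := ((ofList_perm_dedup xs).map (fun k => xs.count k)).sum_eq
  rw [this, List.sum_map_count_dedup_eq_length]

-- A's summation loop over a counter, in closed form
lemma counter_sum_loop (xs : List Char) (init : Int) :
    (PySem.Dict.counter xs).keys.foldl
        (fun acc x => acc + ((PySem.Dict.counter xs).getD x 0 - 1)) init =
      init + (xs.length : Int) - ((PySem.Set.ofList xs).length : Int) := by
  rw [PySem.List.foldl_add (g := fun x => (PySem.Dict.counter xs).getD x 0 - 1)]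
  rw [PySem.Dict.keys_counter]
  have : ((PySem.Set.ofList xs).map (fun x => (PySem.Dict.counter xs).getD x 0 - 1)).sum
      = ((PySem.Set.ofList xs).map (fun k => (xs.count k : Int))).sum
        - ((PySem.Set.ofList xs).length : Int) := by
    simp only [PySem.Dict.getD_counter]
    induction (PySem.Set.ofList xs : List Char) with
    | nil => simp
    | cons a t ih => simp [ih]; ring
  rw [this, sum_counts]; ring

-- under Pre_, every r[0] (and r[1]) exists, so the filterMap keeps all elements
lemma filterMap_length (rooks : List String) (h : Pre_count_attacking_rooks rooks) (i : Int)
    (hi : i = 0 ∨ i = 1) :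
    (rooks.filterMap (fun r => PySem.Str.pyGet? r i)).length = rooks.length := by
  induction rooks with
  | nil => simp
  | cons r t ih =>
    have hr : 2 ≤ PySem.Str.len r := h r (by simp)
    obtain ⟨c, hc⟩ := pyGet_exists r i hi hr
    have hc' : PySem.List.pyGet? r.toList i = some c := by
      simpa [PySem.Str.pyGet?, PySem.Chars.pyGet?] using hc
    simp [hc']
    intro a ha
    obtain ⟨ca, hca⟩ := pyGet_exists a i hi (h a (List.mem_cons_of_mem _ ha))
    simp only [PySem.Str.pyGet?, PySem.Chars.pyGet?] at hca
    simp [hca]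

-- ===== VERDICT (by name: the statement is the Claim_ definition above) =====
theorem count_attacking_rooks_spec : Claim_equal_count_attacking_rooks := by
  intro rooks _ hpre
  unfold Spec_count_attacking_rooks count_attacking_rooks count_attacking_rooks_alt
  rw [aFold_eq_counters rooks hpre]
  simp only [PySem.Dict.foldl_insert_getD_add_one_eq_counter]
  rw [counter_sum_loop, counter_sum_loop]
  have h0 := filterMap_length rooks hpre 0 (Or.inl rfl)
  have h1 := filterMap_length rooks hpre 1 (Or.inr rfl)
  rw [h0, h1]
  ring
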